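-- pv_equiv track=rewrite | github.com/pypi-data/pypi-mirror-264 | packages/FastCNN2/FastCNN2-1.24.327.4.tar.gz/FastCNN2-1.24.327.4/FastCNN/prx/GongDaProxy1.py | getInputBalence
-- ===== SOURCE A (Python) =====
-- def getInputBalence(data,label,count):
--     out_data = []
--     out_label = []
--     for i in range(count):
--         out_data += data
--         out_label += label
--         if len(out_data) > count:
--             break
--     return out_data[:count],out_label[:count]
-- ===== SOURCE B (Python) =====
-- def getInputBalence(data, label, count):
--     if data:
--         reps = min(count, count // len(data) + 1)
--     else:
--         reps = count
--     return (data * reps)[:count], (label * reps)[:count]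
-- ===== Notes on version B (the rewrite author's own statement) =====
-- stated objective: simpler
-- what changed: Replaces the append-and-break loop with a closed-form repetition count (min(count, count//len(data)+1), or count when data is empty) followed by list multiplication and a single slice.
import Mathlib
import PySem

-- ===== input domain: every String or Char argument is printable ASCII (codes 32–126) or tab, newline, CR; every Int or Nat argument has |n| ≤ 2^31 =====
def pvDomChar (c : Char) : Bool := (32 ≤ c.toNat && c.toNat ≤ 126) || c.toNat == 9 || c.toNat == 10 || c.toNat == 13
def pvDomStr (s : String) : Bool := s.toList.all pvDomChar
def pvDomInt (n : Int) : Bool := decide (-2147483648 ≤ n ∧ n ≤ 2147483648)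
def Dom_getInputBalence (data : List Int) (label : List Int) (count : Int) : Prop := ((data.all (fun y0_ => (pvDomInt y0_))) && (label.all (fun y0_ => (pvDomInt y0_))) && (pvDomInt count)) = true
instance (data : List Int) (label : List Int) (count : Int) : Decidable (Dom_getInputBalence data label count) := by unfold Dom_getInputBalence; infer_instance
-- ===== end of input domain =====

-- B replaces A's append-and-break loop by a closed-form repetition count and list tiling (objective: simpler).

-- ===== PORT A =====
-- the 'for i in range(count)' loop with its early break, as structural recursion on the remaining fuel
def pvLoopA (data label : List Int) (count : Int) : Nat → List Int → List Int → List Int × List Int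
  | 0, od, ol => (od, ol)
  | n + 1, od, ol =>
    let od' := od ++ data
    let ol' := ol ++ label
    if (od'.length : Int) > count then (od', ol')
    else pvLoopA data label count n od' ol'

def getInputBalence (data : List Int) (label : List Int) (count : Int) : List Int × List Int :=
  let r := pvLoopA data label count count.toNat [] []
  (PySem.List.slice r.1 none (some count), PySem.List.slice r.2 none (some count))

-- ===== PORT B =====
def getInputBalence_alt (data : List Int) (label : List Int) (count : Int) : List Int × List Int :=
  let reps : Int := if data.isEmpty then count
                    else min count (PySem.Int.floordiv count data.length + 1)
  (PySem.List.slice ((List.replicate reps.toNat data).flatten) none (some count),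
   PySem.List.slice ((List.replicate reps.toNat label).flatten) none (some count))

-- ===== PRECONDITION & SPEC =====
def Spec_getInputBalence (data : List Int) (label : List Int) (count : Int) (out : List Int × List Int) : Prop := out = getInputBalence_alt data label count
instance (data : List Int) (label : List Int) (count : Int) (out : List Int × List Int) : Decidable (Spec_getInputBalence data label count out) := by unfold Spec_getInputBalence; infer_instance

-- ===== CLAIM (what is proved, stated in full; the proofs are below) =====
def Claim_equal_getInputBalence : Prop := ∀ (data : List Int) (label : List Int) (count : Int), Dom_getInputBalence data label count → Spec_getInputBalence data label count (getInputBalence data label count)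

-- ===== LEMMAS AND PROOFS =====

theorem flat_succ {α : Type} (n : Nat) (xs : List α) :
    (List.replicate (n + 1) xs).flatten = (List.replicate n xs).flatten ++ xs := by
  simp [List.replicate_succ']

theorem flat_length {α : Type} (n : Nat) (xs : List α) :
    ((List.replicate n xs).flatten).length = n * xs.length := by
  simp [List.length_flatten, List.map_replicate, List.sum_replicate, smul_eq_mul]

-- the loop with data = [] never breaks: it only tiles the label list
theorem loop_empty (label : List Int) (count : Int) (hc : 0 < count) :
    ∀ n j, pvLoopA [] label count n [] ((List.replicate j label).flatten)
      = ([], (List.replicate (j + n) label).flatten) := by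
  intro n
  induction n with
  | zero => intro j; simp [pvLoopA]
  | succ k ih =>
    intro j
    have hcond : ¬ (((([] : List Int) ++ ([] : List Int)).length : Int) > count) := by
      simp; omega
    simp only [pvLoopA, hcond, if_false]
    rw [← flat_succ]
    have := ih (j + 1)
    rw [show j + 1 + k = j + (k + 1) from by omega] at this
    exact this

-- the loop with data ≠ []: starting after j full tiles (j ≤ count/len), with n fuel left,
-- it ends with exactly min (j+n) (count/len + 1) tiles of both lists
theorem loop_char (data label : List Int) (count : Int) (hd : data ≠ []) (hc : 0 < count) :
    ∀ n j, j ≤ count.toNat / data.length →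
      pvLoopA data label count n ((List.replicate j data).flatten) ((List.replicate j label).flatten)
      = ((List.replicate (min (j + n) (count.toNat / data.length + 1)) data).flatten,
         (List.replicate (min (j + n) (count.toNat / data.length + 1)) label).flatten) := by
  intro n
  have hl : 0 < data.length := List.length_pos_iff.mpr hd
  induction n with
  | zero =>
    intro j hj
    have hmin : min j (count.toNat / data.length + 1) = j := by omega
    simp [pvLoopA, hmin]
  | succ k ih =>
    intro j hj
    have hco : count.toNat = count := Int.toNat_of_nonneg (le_of_lt hc)
    have hlen : ((((List.replicate j data).flatten ++ data).length : Int))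
        = ((j + 1) * data.length : Nat) := by
      rw [List.length_append, flat_length]; push_cast; ring
    by_cases hbr : ((j + 1) * data.length : Nat) > count.toNat
    · -- break fires: j must equal count/len
      have hcond : ((((List.replicate j data).flatten ++ data).length : Int)) > count := by
        rw [hlen, ← hco]; exact_mod_cast hbr
      have hjq : j = count.toNat / data.length := by
        have h1 : count.toNat / data.length < j + 1 := (Nat.div_lt_iff_lt_mul hl).mpr hbr
        omega
      simp only [pvLoopA, hcond, if_true]
      rw [← flat_succ, ← flat_succ]
      have : min (j + (k + 1)) (count.toNat / data.length + 1) = j + 1 := by omega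
      rw [this]
    · -- no break: one more tile, recurse
      have hcond : ¬ ((((List.replicate j data).flatten ++ data).length : Int)) > count := by
        rw [hlen, ← hco]; exact_mod_cast hbr
      have hj1 : j + 1 ≤ count.toNat / data.length :=
        (Nat.le_div_iff_mul_le hl).mpr (by omega)
      simp only [pvLoopA, hcond, if_false]
      rw [← flat_succ, ← flat_succ]
      have := ih (j + 1) hj1
      rw [show j + 1 + k = j + (k + 1) from by omega] at this
      exact this

theorem slice_nil (a b : Option Int) : PySem.List.slice ([] : List Int) a b = [] := by
  cases a <;> cases b <;> simp [PySem.List.slice]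

-- ===== VERDICT (by name: the statement is the Claim_ definition above) =====
theorem getInputBalence_spec : Claim_equal_getInputBalence := by
  intro data label count _
  unfold Spec_getInputBalence getInputBalence getInputBalence_alt
  by_cases hc : 0 < count
  · by_cases hd : data = []
    · -- data empty: loop runs all count iterations tiling only label
      subst hd
      have hL := loop_empty label count hc count.toNat 0
      simp only [List.replicate_zero, List.flatten_nil, Nat.zero_add] at hL
      simp [hL]
    · -- data non-empty: closed-form repetition count
      have hl : 0 < data.length := List.length_pos_iff.mpr hd
      have h0d : (List.replicate 0 data).flatten = ([] : List Int) := rfl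
      have h0l : (List.replicate 0 label).flatten = ([] : List Int) := rfl
      have hmain := loop_char data label count hd hc count.toNat 0 (Nat.zero_le _)
      rw [h0d, h0l] at hmain
      have hco : (count.toNat : Int) = count := Int.toNat_of_nonneg (le_of_lt hc)
      have hfd : PySem.Int.floordiv count (data.length : Int)
          = ((count.toNat / data.length : Nat) : Int) := by
        have h := PySem.Int.floordiv_natCast count.toNat data.length
        rwa [hco] at h
      have hreps : (if data.isEmpty then count
          else min count (PySem.Int.floordiv count (data.length : Int) + 1)).toNat
          = min count.toNat (count.toNat / data.length + 1) := by
        have hde : data.isEmpty = false := by simpa [List.isEmpty_iff] using hd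
        rw [hde, if_neg (by simp), hfd]
        have hq : (0 : Int) ≤ ((count.toNat / data.length : Nat) : Int) := Int.natCast_nonneg _
        omega
      simp only [hmain, hreps, Nat.zero_add]
  · -- count ≤ 0: zero iterations, both sides are ([], [])
    have htn : count.toNat = 0 := by omega
    have hreps : (if data.isEmpty then count
        else min count (PySem.Int.floordiv count (data.length : Int) + 1)).toNat = 0 := by
      split
      · omega
      · have : min count (PySem.Int.floordiv count (data.length : Int) + 1) ≤ count :=
          min_le_left _ _
        omega
    simp only [htn, hreps, pvLoopA, List.replicate_zero, List.flatten_nil, slice_nil]
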